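-- pv_equiv track=rewrite | github.com/pujin2/LING402 | HW8/a.py | sy_check2
-- ===== SOURCE A (Python) =====
-- def sy_check2(values, keys):
-- 	if len(values)<1:
-- 		return 1
-- 	if values[0:4] == ['C', 'V', 'V', 'C']:
-- 		if (keys[1:3] != ['i', 'i']) or (keys[1:3] != ['a', 'a']) or (keys[1:3] != ['u', 'u']):
-- 			return 0
-- 		else:
-- 			return sy_check2(values[4:], keys[4:])
-- 	elif values[0:3] == ['C', 'V', 'V']:
-- 		if (keys[1:3] != ['i', 'i']) or (keys[1:3] != ['a', 'a']) or (keys[1:3] != ['u', 'u']):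
-- 			return 0
-- 		else:
-- 			return sy_check2(values[3:], keys[3:])
-- 	elif values[0:3] == ['C', 'V', 'C']:
-- 		return sy_check2(values[3:], keys[3:])
-- 	elif values[0:2] == ['C', 'V']:
-- 		return sy_check2(values[2:], keys[2:])
-- 	else:
-- 		return 0
-- ===== SOURCE B (Python) =====
-- def sy_check2(values, keys):
--     # Single left-to-right pass with an index pointer instead of rebuilding slices.
--     # Note: A's vowel-cluster key test is vacuously true, so CVV/CVVC always fail.
--     i, n = 0, len(values)
--     while i < n:
--         if i + 1 >= n or values[i] != 'C' or values[i + 1] != 'V':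
--             return 0
--         if i + 2 < n and values[i + 2] == 'V':
--             return 0
--         if i + 2 < n and values[i + 2] == 'C':
--             i += 3
--         else:
--             i += 2
--     return 1
-- ===== Notes on version B (the rewrite author's own statement) =====
-- stated objective: alternative
-- what changed: Replaced A's recursion that rebuilds list slices at every syllable with a single left-to-right scan over an index pointer, keeping the same pattern priority; A's vacuously-true vowel-cluster key test collapses to an immediate rejection of a third V.
import Mathlib
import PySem

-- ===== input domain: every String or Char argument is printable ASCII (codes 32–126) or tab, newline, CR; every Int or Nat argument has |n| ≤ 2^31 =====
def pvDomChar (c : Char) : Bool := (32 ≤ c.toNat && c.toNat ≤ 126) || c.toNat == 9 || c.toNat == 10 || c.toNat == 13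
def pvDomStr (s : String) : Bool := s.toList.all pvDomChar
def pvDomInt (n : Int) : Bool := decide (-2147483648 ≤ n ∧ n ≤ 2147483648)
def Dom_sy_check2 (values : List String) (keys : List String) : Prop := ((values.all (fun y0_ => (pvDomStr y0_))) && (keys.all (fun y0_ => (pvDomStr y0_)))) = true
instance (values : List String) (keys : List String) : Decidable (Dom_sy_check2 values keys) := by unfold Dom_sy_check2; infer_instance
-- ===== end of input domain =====

-- B replaces A's slice-rebuilding recursion with one index-pointer scan (same pattern priority).

-- ===== PORT A =====
def sy_check2 (values : List String) (keys : List String) : Int :=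
  if _h : values.length < 1 then 1
  else if PySem.List.slice values (some 0) (some 4) = ["C", "V", "V", "C"] then
    if PySem.List.slice keys (some 1) (some 3) ≠ ["i", "i"] ∨
       PySem.List.slice keys (some 1) (some 3) ≠ ["a", "a"] ∨
       PySem.List.slice keys (some 1) (some 3) ≠ ["u", "u"] then (0 : Int)
    else sy_check2 (PySem.List.slice values (some 4) none) (PySem.List.slice keys (some 4) none)
  else if PySem.List.slice values (some 0) (some 3) = ["C", "V", "V"] then
    if PySem.List.slice keys (some 1) (some 3) ≠ ["i", "i"] ∨
       PySem.List.slice keys (some 1) (some 3) ≠ ["a", "a"] ∨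
       PySem.List.slice keys (some 1) (some 3) ≠ ["u", "u"] then (0 : Int)
    else sy_check2 (PySem.List.slice values (some 3) none) (PySem.List.slice keys (some 3) none)
  else if PySem.List.slice values (some 0) (some 3) = ["C", "V", "C"] then
    sy_check2 (PySem.List.slice values (some 3) none) (PySem.List.slice keys (some 3) none)
  else if PySem.List.slice values (some 0) (some 2) = ["C", "V"] then
    sy_check2 (PySem.List.slice values (some 2) none) (PySem.List.slice keys (some 2) none)
  else 0
termination_by values.length
decreasing_by
  all_goals rw [PySem.List.slice_from _ (by norm_num)]; simp; omega

-- ===== PORT B =====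
def syCheckLoop (values : List String) (n : Nat) (i : Nat) : Int :=
  if h : i < n then
    if i + 1 ≥ n ∨ ¬ values[i]? = some "C" ∨ ¬ values[i + 1]? = some "V" then 0
    else if i + 2 < n ∧ values[i + 2]? = some "V" then 0
    else if i + 2 < n ∧ values[i + 2]? = some "C" then syCheckLoop values n (i + 3)
    else syCheckLoop values n (i + 2)
  else 1
termination_by n - i
decreasing_by all_goals omega

def sy_check2_alt (values : List String) (keys : List String) : Int :=
  syCheckLoop values values.length 0

-- ===== PRECONDITION & SPEC =====
def Spec_sy_check2 (values : List String) (keys : List String) (out : Int) : Prop := out = sy_check2_alt values keys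
instance (values : List String) (keys : List String) (out : Int) : Decidable (Spec_sy_check2 values keys out) := by unfold Spec_sy_check2; infer_instance

-- ===== CLAIM (what is proved, stated in full; the proofs are below) =====
def Claim_equal_sy_check2 : Prop := ∀ (values : List String) (keys : List String), Dom_sy_check2 values keys → Spec_sy_check2 values keys (sy_check2 values keys)

-- ===== LEMMAS AND PROOFS =====

-- A's three-way ≠-disjunction on keys[1:3] is vacuously true (the slice cannot equal all three lists).
lemma keycond_true (ks : List String) :
    PySem.List.slice ks (some 1) (some 3) ≠ ["i", "i"] ∨
    PySem.List.slice ks (some 1) (some 3) ≠ ["a", "a"] ∨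
    PySem.List.slice ks (some 1) (some 3) ≠ ["u", "u"] := by
  by_cases h : PySem.List.slice ks (some 1) (some 3) = ["i", "i"]
  · right; left; simp [h]
  · left; exact h

lemma take2_iff (l : List String) (a b : String) :
    l.take 2 = [a, b] ↔ l[0]? = some a ∧ l[1]? = some b := by
  match l with
  | [] => simp
  | [x] => simp
  | x :: y :: rest => simp [and_comm]

lemma take3_iff (l : List String) (a b c : String) :
    l.take 3 = [a, b, c] ↔ l[0]? = some a ∧ l[1]? = some b ∧ l[2]? = some c := by
  match l with
  | [] => simp
  | [x] => simp
  | [x, y] => simp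
  | x :: y :: z :: rest => simp

lemma take4_iff (l : List String) (a b c d : String) :
    l.take 4 = [a, b, c, d] ↔
      l[0]? = some a ∧ l[1]? = some b ∧ l[2]? = some c ∧ l[3]? = some d := by
  match l with
  | [] => simp
  | [x] => simp
  | [x, y] => simp
  | [x, y, z] => simp
  | x :: y :: z :: w :: rest => simp

-- slices of A, normalised to take/drop
lemma sliceTake (l : List String) (k : Int) (hk : 0 ≤ k) :
    PySem.List.slice l (some 0) (some k) = l.take k.toNat := by
  rw [PySem.List.slice_toNat _ (le_refl 0) hk]
  simp

theorem loop_eq (values : List String) (i : Nat) (keys : List String) :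
    syCheckLoop values values.length i = sy_check2 (values.drop i) keys := by
  rw [syCheckLoop]
  by_cases h : i < values.length
  · simp only [dif_pos h]
    rw [sy_check2.eq_def]
    have hlen : ¬ (values.drop i).length < 1 := by simp; omega
    simp only [dif_neg hlen]
    have g0 : (values.drop i)[0]? = values[i]? := by simpa using (List.getElem?_drop (xs := values) (i := i) (j := 0))
    have g1 : (values.drop i)[1]? = values[i + 1]? := List.getElem?_drop ..
    have g2 : (values.drop i)[2]? = values[i + 2]? := List.getElem?_drop ..
    have g3 : (values.drop i)[3]? = values[i + 3]? := List.getElem?_drop ..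
    rw [sliceTake _ 4 (by norm_num), sliceTake _ 3 (by norm_num), sliceTake _ 2 (by norm_num)]
    rw [PySem.List.slice_from _ (by norm_num : (0:Int) ≤ 4),
        PySem.List.slice_from _ (by norm_num : (0:Int) ≤ 3),
        PySem.List.slice_from _ (by norm_num : (0:Int) ≤ 2)]
    simp only [show Int.toNat 4 = 4 from rfl, show Int.toNat 3 = 3 from rfl,
               show Int.toNat 2 = 2 from rfl]
    simp only [take4_iff, take3_iff, take2_iff, g0, g1, g2, g3]
    have hd2 : List.drop 2 (List.drop i values) = values.drop (i + 2) := by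
      rw [List.drop_drop, Nat.add_comm]
    have hd3 : List.drop 3 (List.drop i values) = values.drop (i + 3) := by
      rw [List.drop_drop, Nat.add_comm]
    by_cases hCV : values[i]? = some "C" ∧ values[i + 1]? = some "V"
    · obtain ⟨hc, hv⟩ := hCV
      obtain ⟨hn1, -⟩ := List.getElem?_eq_some_iff.mp hv
      have c1 : ¬ (i + 1 ≥ values.length ∨ ¬values[i]? = some "C" ∨ ¬values[i + 1]? = some "V") := by
        push_neg; exact ⟨hn1, hc, hv⟩
      rw [if_neg c1]
      rcases h2 : values[i + 2]? with _ | x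
      · have hn2 : values.length ≤ i + 2 := List.getElem?_eq_none_iff.mp h2
        have nb : ¬ (i + 2 < values.length) := by omega
        rw [if_neg (fun hh => nb hh.1), if_neg (fun hh => nb hh.1),
            if_neg (fun hh => nomatch hh.2.2.1), if_neg (fun hh => nomatch hh.2.2),
            if_neg (fun hh => nomatch hh.2.2), if_pos ⟨hc, hv⟩, hd2]
        exact loop_eq values (i + 2) _
      · by_cases hxV : x = "V"
        · subst hxV
          have hn2 : i + 2 < values.length := (List.getElem?_eq_some_iff.mp h2).1
          have B2 : i + 2 < values.length ∧ (some "V" : Option String) = some "V" := ⟨hn2, rfl⟩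
          rw [if_pos B2]
          by_cases a4 : values[i]? = some "C" ∧ values[i + 1]? = some "V" ∧
              (some "V" : Option String) = some "V" ∧ values[i + 3]? = some "C"
          · rw [if_pos a4, if_pos (keycond_true keys)]
          · have A3 : values[i]? = some "C" ∧ values[i + 1]? = some "V" ∧
                (some "V" : Option String) = some "V" := ⟨hc, hv, rfl⟩
            rw [if_neg a4, if_pos A3, if_pos (keycond_true keys)]
        · have hsx : ¬ ((some x : Option String) = some "V") := by simpa using hxV
          have B2 : ¬ (i + 2 < values.length ∧ (some x : Option String) = some "V") :=
            fun hh => hsx hh.2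
          have A4 : ¬ (values[i]? = some "C" ∧ values[i + 1]? = some "V" ∧
              (some x : Option String) = some "V" ∧ values[i + 3]? = some "C") :=
            fun hh => hsx hh.2.2.1
          have A3 : ¬ (values[i]? = some "C" ∧ values[i + 1]? = some "V" ∧
              (some x : Option String) = some "V") := fun hh => hsx hh.2.2
          rw [if_neg B2, if_neg A4, if_neg A3]
          by_cases hxC : x = "C"
          · subst hxC
            have hn2 : i + 2 < values.length := (List.getElem?_eq_some_iff.mp h2).1
            have B3 : i + 2 < values.length ∧ (some "C" : Option String) = some "C" := ⟨hn2, rfl⟩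
            have A3' : values[i]? = some "C" ∧ values[i + 1]? = some "V" ∧
                (some "C" : Option String) = some "C" := ⟨hc, hv, rfl⟩
            rw [if_pos B3, if_pos A3', hd3]
            exact loop_eq values (i + 3) _
          · have hsc : ¬ ((some x : Option String) = some "C") := by simpa using hxC
            have B3 : ¬ (i + 2 < values.length ∧ (some x : Option String) = some "C") :=
              fun hh => hsc hh.2
            have A3' : ¬ (values[i]? = some "C" ∧ values[i + 1]? = some "V" ∧
                (some x : Option String) = some "C") := fun hh => hsc hh.2.2
            rw [if_neg B3, if_neg A3', if_pos ⟨hc, hv⟩, hd2]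
            exact loop_eq values (i + 2) _
    · have c1 : i + 1 ≥ values.length ∨ ¬values[i]? = some "C" ∨ ¬values[i + 1]? = some "V" := by tauto
      rw [if_pos c1]
      have a4 : ¬ (values[i]? = some "C" ∧ values[i + 1]? = some "V" ∧
          values[i + 2]? = some "V" ∧ values[i + 3]? = some "C") := by tauto
      have a3 : ¬ (values[i]? = some "C" ∧ values[i + 1]? = some "V" ∧ values[i + 2]? = some "V") := by tauto
      have a3' : ¬ (values[i]? = some "C" ∧ values[i + 1]? = some "V" ∧ values[i + 2]? = some "C") := by tauto
      rw [if_neg a4, if_neg a3, if_neg a3', if_neg hCV]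
  · simp only [dif_neg h]
    rw [sy_check2.eq_def]
    have hl : (values.drop i).length < 1 := by simp; omega
    rw [dif_pos hl]
termination_by values.length - i
decreasing_by all_goals omega

-- ===== VERDICT (by name: the statement is the Claim_ definition above) =====
theorem sy_check2_spec : Claim_equal_sy_check2 := by
  intro values keys _
  unfold Spec_sy_check2 sy_check2_alt
  have := loop_eq values 0 keys
  simp at this
  exact this.symm
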